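-- pv_equiv track=rewrite | github.com/KuSi833/search-and-learn | scripts/figures.py | _parse_metrics_arg
-- ===== SOURCE A (Python) =====
-- from typing import Any, Dict, Iterable, List, Optional, Sequence, Tuple
--
-- DEFAULT_METRICS: Tuple[str, ...] = (
--     "agreement_ratio",
--     "entropy_freq",
--     "entropy_weighted",
--     "prm_margin",
--     "prm_top_frac",
--     "consensus_support",
--     "prm_std",
--     "prm_mean",
-- )
--
-- def _parse_metrics_arg(values: Optional[Iterable[str]]) -> List[str]:
--     if not values:
--         return list(DEFAULT_METRICS)
--     out: List[str] = []
--     for v in values: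
--         if "," in v:
--             out.extend([x.strip() for x in v.split(",") if x.strip()])
--         else:
--             vv = v.strip()
--             if vv:
--                 out.append(vv)
--     # Deduplicate preserving order
--     seen = set()
--     deduped: List[str] = []
--     for m in out:
--         if m in seen:
--             continue
--         seen.add(m)
--         deduped.append(m)
--     # Validate against supported
--     supported = set(DEFAULT_METRICS)
--     final = [m for m in deduped if m in supported]
--     return final or list(DEFAULT_METRICS)
-- ===== SOURCE B (Python) =====
-- from typing import Iterable, List, Optional
--
-- DEFAULT_METRICS = (
--     "agreement_ratio",
--     "entropy_freq",
--     "entropy_weighted",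
--     "prm_margin",
--     "prm_top_frac",
--     "consensus_support",
--     "prm_std",
--     "prm_mean",
-- )
--
-- def _parse_metrics_arg(values: Optional[Iterable[str]]) -> List[str]:
--     if not values:
--         return list(DEFAULT_METRICS)
--     # Flatten once into the stream of non-empty stripped tokens, then select the
--     # supported metrics that occur and order them by first occurrence: no seen-set,
--     # no incremental dedup loop.
--     tokens = [p.strip() for v in values for p in v.split(",") if p.strip()]
--     present = [m for m in DEFAULT_METRICS if m in tokens]
--     present.sort(key=tokens.index)
--     return present or list(DEFAULT_METRICS)
-- ===== Notes on version B (the rewrite author's own statement) =====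
-- stated objective: alternative
-- what changed: Instead of A's streaming split/dedup-with-seen-set/validate passes, B flattens the inputs once into the token stream, selects the supported metrics that occur by iterating over DEFAULT_METRICS, and orders them by their first-occurrence index with sort(key=tokens.index); no seen-set or dedup loop exists in B.
import Mathlib
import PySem

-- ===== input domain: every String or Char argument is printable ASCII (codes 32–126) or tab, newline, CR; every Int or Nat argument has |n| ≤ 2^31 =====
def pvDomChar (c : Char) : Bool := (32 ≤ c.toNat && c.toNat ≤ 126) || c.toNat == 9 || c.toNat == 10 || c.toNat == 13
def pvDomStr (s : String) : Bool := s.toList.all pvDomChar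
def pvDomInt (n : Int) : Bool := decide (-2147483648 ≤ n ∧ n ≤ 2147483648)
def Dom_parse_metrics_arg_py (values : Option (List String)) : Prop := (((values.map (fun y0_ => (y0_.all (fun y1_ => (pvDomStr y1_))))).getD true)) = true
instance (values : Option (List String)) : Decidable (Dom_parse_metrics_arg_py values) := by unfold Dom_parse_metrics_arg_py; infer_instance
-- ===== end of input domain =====

-- B replaces A's split/dedup-with-seen-set/validate passes by a different algorithm:
-- flatten once into the token stream, pick the supported metrics that occur by scanning
-- DEFAULT_METRICS, and order them by first-occurrence index with a key-sort; same value.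

def pvDefaultMetrics : List String :=
  ["agreement_ratio", "entropy_freq", "entropy_weighted", "prm_margin",
   "prm_top_frac", "consensus_support", "prm_std", "prm_mean"]

-- ===== PORT A =====
-- literal transliteration of _parse_metrics_arg: build `out` (comma branch vs strip branch),
-- then dedup with a seen-set, then filter by the supported set, then `final or DEFAULT`.
def parse_metrics_arg_py (values : Option (List String)) : List String :=
  match values with
  | none => pvDefaultMetrics
  | some vs =>
    if vs = [] then pvDefaultMetrics
    else
      let out : List String := vs.foldl (fun out v =>
        if PySem.Str.isIn "," v then
          -- [x.strip() for x in v.split(",") if x.strip()]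
          out ++ ((((PySem.Str.split? v ",").getD []).map PySem.Str.strip).filter (fun x => x ≠ ""))
        else
          let vv := PySem.Str.strip v
          if vv ≠ "" then out ++ [vv] else out) []
      let deduped := (out.foldl (fun (st : PySem.Set String × List String) m =>
        if st.1.contains m = true then st else (st.1.add m, st.2 ++ [m]))
        (PySem.Set.empty, [])).2
      let supported : PySem.Set String := PySem.Set.ofList pvDefaultMetrics
      let final := deduped.filter (fun m => supported.contains m)
      if final = [] then pvDefaultMetrics else final

-- ===== PORT B =====
-- transliteration of Source B: tokens = flattened non-empty stripped pieces; present = supported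
-- metrics occurring in tokens; present.sort(key=tokens.index). Every m in present is in
-- tokens, so Python's raising tokens.index(m) is total here; `.getD 0` is never reached.
def parse_metrics_arg_py_alt (values : Option (List String)) : List String :=
  match values with
  | none => pvDefaultMetrics
  | some vs =>
    if vs = [] then pvDefaultMetrics
    else
      let tokens : List String := vs.flatMap (fun v =>
        ((((PySem.Str.split? v ",").getD []).filter (fun p => PySem.Str.strip p ≠ "")).map PySem.Str.strip))
      let present := pvDefaultMetrics.filter (fun m => tokens.contains m)
      let present := PySem.List.sorted present (fun m => (PySem.List.index? tokens m).getD 0) false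
      if present = [] then pvDefaultMetrics else present

-- ===== PRECONDITION & SPEC =====
def Spec_parse_metrics_arg_py (values : Option (List String)) (out : List String) : Prop := out = parse_metrics_arg_py_alt values
instance (values : Option (List String)) (out : List String) : Decidable (Spec_parse_metrics_arg_py values out) := by unfold Spec_parse_metrics_arg_py; infer_instance

-- ===== CLAIM =====
def Claim_equal_parse_metrics_arg_py : Prop := ∀ (values : Option (List String)), Dom_parse_metrics_arg_py values → Spec_parse_metrics_arg_py values (parse_metrics_arg_py values)

-- ===== LEMMAS AND PROOFS =====

-- the stripped, non-empty pieces contributed by one value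
def pvPieces (v : String) : List String :=
  (((PySem.Str.split? v ",").getD []).map PySem.Str.strip).filter (fun x => x ≠ "")

-- A's dedup pass as a structural recursion
def pvDedup (seen : PySem.Set String) : List String → List String
  | [] => []
  | m :: t => if seen.contains m = true then pvDedup seen t else m :: pvDedup (seen.add m) t

theorem pvDedup_cons (seen : PySem.Set String) (m : String) (t : List String) :
    pvDedup seen (m :: t)
      = if seen.contains m = true then pvDedup seen t else m :: pvDedup (seen.add m) t := rfl

theorem pv_contains_add (s : PySem.Set String) (m x : String) :
    (s.add m).contains x = (s.contains x || x == m) := by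
  unfold PySem.Set.add
  by_cases h : s.contains m = true
  · rw [if_pos h]
    by_cases hx : x = m
    · subst hx
      rw [beq_self_eq_true, Bool.or_true]
      exact h
    · have hxm : (x == m) = false := beq_eq_false_iff_ne.mpr hx
      rw [hxm, Bool.or_false]
  · rw [if_neg h]
    cases hxm : x == m with
    | true =>
      have hx : x = m := beq_iff_eq.mp hxm
      simp [PySem.Set.contains, hx]
    | false =>
      have hne : x ≠ m := beq_eq_false_iff_ne.mp hxm
      simp [PySem.Set.contains, hne]

theorem pv_go_no_comma (fuel : Nat) (l cur : List Char) (acc : List (List Char))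
    (h : ',' ∉ l) :
    PySem.Chars.splitOn.go [','] fuel l cur acc = acc.reverse ++ [cur.reverse ++ l] := by
  induction fuel generalizing l cur acc with
  | zero => rw [PySem.Chars.splitOn.go.eq_def]; simp
  | succ fuel ih =>
    cases l with
    | nil => rw [PySem.Chars.splitOn.go.eq_def]; simp
    | cons c rest =>
      have hc : c ≠ ',' := fun hcc => h (hcc ▸ List.mem_cons_self)
      rw [show PySem.Chars.splitOn.go [','] (fuel + 1) (c :: rest) cur acc
          = if List.isPrefixOf [','] (c :: rest) = true
            then PySem.Chars.splitOn.go [','] fuel (List.drop (List.length [',']) (c :: rest)) []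
              (cur.reverse :: acc)
            else PySem.Chars.splitOn.go [','] fuel rest (c :: cur) acc from rfl]
      rw [if_neg (by simp [List.isPrefixOf, Ne.symm hc])]
      rw [ih rest (c :: cur) acc (fun hm => h (List.mem_cons_of_mem _ hm))]
      simp

theorem pv_split_no_comma (v : String) (h : PySem.Str.isIn "," v = false) :
    (PySem.Str.split? v ",").getD [] = [v] := by
  have hmem : ',' ∉ v.toList := by
    intro hm
    rw [PySem.Str.isIn_eq, PySem.Chars.isIn_eq_false_iff] at h
    exact h (by
      obtain ⟨a, b, hab⟩ := List.append_of_mem hm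
      exact ⟨a, b, by simp [hab]⟩)
  have hsplit : PySem.Chars.splitOn v.toList [','] = [v.toList] := by
    unfold PySem.Chars.splitOn
    rw [pv_go_no_comma _ _ _ _ hmem]
    simp
  simp [PySem.Str.split?, PySem.Chars.split?, hsplit]

-- when v has no comma, its pieces are just its stripped self (if non-empty)
theorem pv_pieces_no_comma (v : String) (hc : PySem.Str.isIn "," v = false) :
    pvPieces v = if PySem.Str.strip v ≠ "" then [PySem.Str.strip v] else [] := by
  unfold pvPieces
  rw [pv_split_no_comma v hc]
  simp only [List.map_cons, List.map_nil, List.filter_cons, List.filter_nil]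
  split_ifs <;> simp_all

-- A's accumulation loop builds exactly the concatenation of the per-value pieces
theorem pv_a_out (vs : List String) (acc : List String) :
    vs.foldl (fun out v =>
        if PySem.Str.isIn "," v then
          out ++ ((((PySem.Str.split? v ",").getD []).map PySem.Str.strip).filter (fun x => x ≠ ""))
        else
          let vv := PySem.Str.strip v
          if vv ≠ "" then out ++ [vv] else out) acc
      = acc ++ vs.flatMap pvPieces := by
  induction vs generalizing acc with
  | nil => simp
  | cons v t ih =>
    simp only [List.foldl_cons, List.flatMap_cons]
    rw [ih]
    have hstep : (if PySem.Str.isIn "," v = true then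
          acc ++ ((((PySem.Str.split? v ",").getD []).map PySem.Str.strip).filter (fun x => x ≠ ""))
        else
          if PySem.Str.strip v ≠ "" then acc ++ [PySem.Str.strip v] else acc) = acc ++ pvPieces v := by
      rcases Bool.eq_false_or_eq_true (PySem.Str.isIn "," v) with hc | hc
      · rw [if_pos hc]
        rfl
      · rw [if_neg (by rw [hc]; simp), pv_pieces_no_comma v hc]
        split_ifs <;> simp
    rw [hstep, List.append_assoc]

-- A's dedup loop is pvDedup
theorem pv_a_dedup (L : List String) (seen : PySem.Set String) (acc : List String) :
    (L.foldl (fun (st : PySem.Set String × List String) m =>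
        if st.1.contains m = true then st else (st.1.add m, st.2 ++ [m])) (seen, acc)).2
      = acc ++ pvDedup seen L := by
  induction L generalizing seen acc with
  | nil => simp [pvDedup]
  | cons m t ih =>
    simp only [List.foldl_cons]
    by_cases h : seen.contains m = true
    · rw [if_pos h, ih, pvDedup_cons, if_pos h]
    · rw [if_neg h, ih, pvDedup_cons, if_neg h]
      simp

-- membership in the dedup result
theorem pv_mem_dedup (L : List String) (seen : PySem.Set String) (a : String) :
    a ∈ pvDedup seen L ↔ a ∈ L ∧ seen.contains a = false := by
  induction L generalizing seen with
  | nil => simp [pvDedup]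
  | cons m t ih =>
    rw [pvDedup_cons]
    by_cases h : seen.contains m = true
    · rw [if_pos h, ih]
      constructor
      · rintro ⟨ht, hs⟩
        exact ⟨List.mem_cons_of_mem _ ht, hs⟩
      · rintro ⟨hm, hs⟩
        rcases List.mem_cons.mp hm with rfl | ht
        · exact absurd h (by rw [hs]; simp)
        · exact ⟨ht, hs⟩
    · rw [if_neg h]
      have h' : seen.contains m = false := Bool.eq_false_iff.mpr h
      constructor
      · intro hmem
        rcases List.mem_cons.mp hmem with rfl | htail
        · exact ⟨List.mem_cons_self, h'⟩
        · obtain ⟨ht, hs⟩ := (ih (seen.add m)).mp htail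
          rw [pv_contains_add] at hs
          rcases Bool.or_eq_false_iff.mp hs with ⟨h1, _⟩
          exact ⟨List.mem_cons_of_mem _ ht, h1⟩
      · rintro ⟨hm, hs⟩
        rcases List.mem_cons.mp hm with rfl | ht
        · exact List.mem_cons_self
        · by_cases ham : a = m
          · subst ham; exact List.mem_cons_self
          · refine List.mem_cons_of_mem _ ((ih (seen.add m)).mpr ⟨ht, ?_⟩)
            rw [pv_contains_add, hs, Bool.false_or]
            exact beq_eq_false_iff_ne.mpr ham

-- first-occurrence index (B's sort key)
def pvIdx (L : List String) (a : String) : Nat := (PySem.List.index? L a).getD 0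

theorem pv_idx_cons_of_mem (t : List String) (m a : String) (ht : a ∈ t) (hne : m ≠ a) :
    pvIdx (m :: t) a = pvIdx t a + 1 := by
  unfold pvIdx
  rw [PySem.List.index?_cons_of_ne t hne]
  obtain ⟨i, hi⟩ := Option.isSome_iff_exists.mp ((PySem.List.index?_isSome_iff t a).mpr ht)
  rw [hi]
  rfl

-- the dedup result lists elements in strictly increasing order of first occurrence
theorem pv_dedup_pairwise (L : List String) (seen : PySem.Set String) :
    (pvDedup seen L).Pairwise (fun a b => pvIdx L a < pvIdx L b) := by
  induction L generalizing seen with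
  | nil => simp [pvDedup]
  | cons m t ih =>
    have lift : ∀ (s' : PySem.Set String),
        (pvDedup s' t).Pairwise (fun a b => pvIdx (m :: t) a < pvIdx (m :: t) b)
        ∨ m ∈ pvDedup s' t := by
      intro s'
      by_cases hm : m ∈ pvDedup s' t
      · exact Or.inr hm
      · refine Or.inl ((ih s').imp_of_mem (fun {a b} ha hb hab => ?_))
        have hat : a ∈ t := ((pv_mem_dedup t s' a).mp ha).1
        have hbt : b ∈ t := ((pv_mem_dedup t s' b).mp hb).1
        have hma : m ≠ a := fun h => hm (h ▸ ha)
        have hmb : m ≠ b := fun h => hm (h ▸ hb)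
        rw [pv_idx_cons_of_mem t m a hat hma, pv_idx_cons_of_mem t m b hbt hmb]
        omega
    rw [pvDedup_cons]
    by_cases h : seen.contains m = true
    · rw [if_pos h]
      rcases lift seen with hp | hmem
      · exact hp
      · exact absurd ((pv_mem_dedup t seen m).mp hmem).2 (by rw [h]; simp)
    · rw [if_neg h]
      have hnm : m ∉ pvDedup (seen.add m) t := by
        intro hmem
        have := ((pv_mem_dedup t (seen.add m) m).mp hmem).2
        rw [pv_contains_add] at this
        simp at this
      refine List.Pairwise.cons ?_ ?_
      · intro b hb
        have hbt : b ∈ t := ((pv_mem_dedup t (seen.add m) b).mp hb).1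
        have hmb : m ≠ b := fun heq => hnm (heq ▸ hb)
        have h0 : pvIdx (m :: t) m = 0 := by
          unfold pvIdx
          rw [PySem.List.index?_cons_self]
          rfl
        rw [h0, pv_idx_cons_of_mem t m b hbt hmb]
        omega
      · rcases lift (seen.add m) with hp | hmem
        · exact hp
        · exact absurd hmem hnm

-- main: B's filter-and-sort over DEFAULT_METRICS equals A's dedup-then-validate
theorem pv_main (O : List String) :
    PySem.List.sorted (pvDefaultMetrics.filter (fun m => O.contains m)) (fun m => pvIdx O m) false
      = (pvDedup PySem.Set.empty O).filter
          (fun m => (PySem.Set.ofList pvDefaultMetrics).contains m) := by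
  have hEmpty : ∀ a : String, (PySem.Set.empty : PySem.Set String).contains a = false := by
    intro a; rfl
  have hpA : (pvDedup PySem.Set.empty O).Pairwise (fun a b => pvIdx O a < pvIdx O b) :=
    pv_dedup_pairwise O PySem.Set.empty
  have hpYs : ((pvDedup PySem.Set.empty O).filter
      (fun m => (PySem.Set.ofList pvDefaultMetrics).contains m)).Pairwise
      (fun a b => pvIdx O a < pvIdx O b) := hpA.filter _
  have hndYs : ((pvDedup PySem.Set.empty O).filter
      (fun m => (PySem.Set.ofList pvDefaultMetrics).contains m)).Nodup :=
    hpYs.imp (fun {a b} hab => by intro hEq; subst hEq; omega)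
  have hndXs : (pvDefaultMetrics.filter (fun m => O.contains m)).Nodup :=
    List.Nodup.filter _ (by decide)
  have hperm : ((pvDedup PySem.Set.empty O).filter
      (fun m => (PySem.Set.ofList pvDefaultMetrics).contains m)).Perm
      (pvDefaultMetrics.filter (fun m => O.contains m)) := by
    rw [List.perm_ext_iff_of_nodup hndYs hndXs]
    intro a
    rw [List.mem_filter, List.mem_filter, pv_mem_dedup, hEmpty a, PySem.Set.contains_iff]
    rw [PySem.Set.mem_ofList]
    constructor
    · rintro ⟨⟨hO, _⟩, hdef⟩
      exact ⟨by simpa using hdef, by simpa using hO⟩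
    · rintro ⟨hdef, hO⟩
      exact ⟨⟨by simpa using hO, rfl⟩, by simpa using hdef⟩
  exact PySem.List.sorted_eq_of_perm_of_pairwise_lt _ _ _ hperm hpYs

-- ===== VERDICT (by name: the statement is the Claim_ definition above) =====
theorem parse_metrics_arg_py_spec : Claim_equal_parse_metrics_arg_py := by
  intro values _
  unfold Spec_parse_metrics_arg_py parse_metrics_arg_py parse_metrics_arg_py_alt
  match values with
  | none => rfl
  | some vs =>
    by_cases hvs : vs = []
    · simp [hvs]
    · simp only [hvs, if_false]
      have htok : vs.flatMap (fun v =>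
          ((((PySem.Str.split? v ",").getD []).filter (fun p => PySem.Str.strip p ≠ "")).map PySem.Str.strip))
          = vs.flatMap pvPieces := by
        refine List.flatMap_congr (fun v _ => ?_)
        unfold pvPieces
        rw [List.filter_map]
        rfl
      rw [pv_a_out vs [], List.nil_append, pv_a_dedup, List.nil_append, htok, ← pv_main]
      rfl
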